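-- pv_equiv track=rewrite | github.com/Kawser-nerd/CLCDSA | Source Codes/CodeJamData/14/42/11.py | solve
-- ===== SOURCE A (Python) =====
-- def solve(seq):
--     cost = 0
--     while seq:
--         e, i = min((seq[i], i) for i in range(len(seq)))
--
--         sw_left = i
--         sw_right = (len(seq)-1) - i
--
--         cost += min(sw_left, sw_right)
--
--         del seq[i]
--     return cost
-- ===== SOURCE B (Python) =====
-- def solve(seq):
--     total = 0
--     for i, x in enumerate(seq):
--         left = sum(1 if y > x else 0 for y in seq[:i])
--         right = sum(1 if y >= x else 0 for y in seq[i+1:])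
--         total += min(left, right)
--     return total
-- ===== Notes on version B (the rewrite author's own statement) =====
-- stated objective: alternative
-- what changed: Replaces the destructive while-loop that repeatedly rescans the list for the (value,index) minimum and deletes it with a single non-mutating pass that computes each element's cost in closed form: min(#strictly-larger elements before it, #larger-or-equal elements after it); note A empties its argument in place while B leaves it untouched (equivalence is about the return value).
import Mathlib
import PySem

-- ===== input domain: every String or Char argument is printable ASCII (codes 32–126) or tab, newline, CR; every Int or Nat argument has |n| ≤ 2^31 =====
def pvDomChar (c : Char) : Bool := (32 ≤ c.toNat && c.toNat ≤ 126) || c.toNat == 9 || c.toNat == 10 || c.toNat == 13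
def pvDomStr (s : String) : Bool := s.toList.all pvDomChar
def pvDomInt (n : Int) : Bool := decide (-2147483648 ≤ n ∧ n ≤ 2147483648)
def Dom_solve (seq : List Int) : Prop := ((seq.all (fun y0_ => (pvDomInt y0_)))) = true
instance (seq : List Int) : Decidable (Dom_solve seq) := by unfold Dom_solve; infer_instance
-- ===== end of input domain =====

-- B replaces A's destructive repeated-min-and-delete loop by a single non-mutating pass with a
-- closed-form per-element cost (alternative algorithm, same asymptotic cost); A empties its list
-- argument in place, B does not mutate — the equivalence proved is about the return value.
-- ===== PORT A =====
-- the step function of PySem.List.min2? at keys Prod.fst / Prod.snd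
def pvStep (acc : Option (Int × Int)) (x : Int × Int) : Option (Int × Int) :=
  match acc with
  | none => some x
  | some m =>
    if (decide (Prod.fst x < Prod.fst m) ||
        !decide (Prod.fst m < Prod.fst x) && decide (Prod.snd x < Prod.snd m)) = true
    then some x else some m

theorem min2?_eq_foldl (xs : List (Int × Int)) :
    PySem.List.min2? xs Prod.fst Prod.snd = xs.foldl pvStep none := by
  unfold PySem.List.min2?
  congr 1
  funext acc x
  cases acc <;> rfl

theorem pv_min2_fold_mem : ∀ (xs : List (Int × Int)) (acc : Option (Int × Int)) (m : Int × Int),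
    List.foldl pvStep acc xs = some m → acc = some m ∨ m ∈ xs := by
  intro xs
  induction xs with
  | nil => intro acc m h; exact Or.inl h
  | cons x t ih =>
      intro acc m h
      rw [List.foldl_cons] at h
      rcases ih _ _ h with hstep | hmem
      · match acc with
        | none =>
            simp only [pvStep] at hstep
            cases hstep
            exact Or.inr (by simp)
        | some mm =>
            simp only [pvStep] at hstep
            split at hstep
            · cases hstep
              exact Or.inr (by simp)
            · exact Or.inl hstep
      · exact Or.inr (List.mem_cons_of_mem _ hmem)

-- helper lemma cited by solveLoop's decreasing_by: the index produced by min2? over the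
-- (value, index) pairs is a valid index of seq
theorem pv_min2_pairs_mem {seq : List Int} {e i : Int}
    (h : PySem.List.min2? ((PySem.List.pyRange 0 (seq.length : Int) 1).map
          (fun j => (PySem.List.pyGetD seq j 0, j))) Prod.fst Prod.snd = some (e, i)) :
    i.toNat < seq.length ∧ 0 ≤ i ∧ e = PySem.List.pyGetD seq i 0 := by
  rw [min2?_eq_foldl] at h
  rcases pv_min2_fold_mem _ _ _ h with hnone | hmem
  · cases hnone
  · obtain ⟨j, hj, hfj⟩ := List.mem_map.mp hmem
    rw [PySem.List.mem_pyRange_one] at hj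
    have he : PySem.List.pyGetD seq j 0 = e := congrArg Prod.fst hfj
    have hi : j = i := congrArg Prod.snd hfj
    subst hi
    refine ⟨by omega, by omega, he.symm⟩

def solveLoop (seq : List Int) (cost : Int) : Int :=
  if seq.isEmpty then cost
  else
    let pairs := (PySem.List.pyRange 0 (seq.length : Int) 1).map
      (fun j => (PySem.List.pyGetD seq j 0, j))
    match hm : PySem.List.min2? pairs Prod.fst Prod.snd with
    | none => cost  -- unreachable: pairs is nonempty
    | some (e, i) =>
      let sw_left := i
      let sw_right := ((seq.length : Int) - 1) - i
      solveLoop (seq.eraseIdx i.toNat) (cost + min sw_left sw_right)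
termination_by seq.length
decreasing_by
  have hlt := (pv_min2_pairs_mem hm).1
  have h0 : 0 < seq.length := Nat.lt_of_le_of_lt (Nat.zero_le _) hlt
  rw [List.length_eraseIdx]
  simp [hlt]
  omega

def solve (seq : List Int) : Int := solveLoop seq 0

-- ===== PORT B =====
def solve_alt (seq : List Int) : Int :=
  (PySem.List.enumerate seq 0).foldl (fun total p =>
    let i := p.1
    let x := p.2
    let left := ((PySem.List.slice seq none (some i)).map
      (fun y => if x < y then (1 : Int) else 0)).sum
    let right := ((PySem.List.slice seq (some (i + 1)) none).map
      (fun y => if x ≤ y then (1 : Int) else 0)).sum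
    total + min left right) 0

-- ===== PRECONDITION & SPEC =====
def Spec_solve (seq : List Int) (out : Int) : Prop := out = solve_alt seq
instance (seq : List Int) (out : Int) : Decidable (Spec_solve seq out) := by unfold Spec_solve; infer_instance

-- ===== CLAIM (what is proved, stated in full; the proofs are below) =====
def Claim_equal_solve : Prop := ∀ (seq : List Int), Dom_solve seq → Spec_solve seq (solve seq)

-- ===== LEMMAS AND PROOFS =====

-- the common specification both programs compute: walk the list keeping the processed prefix,
-- paying min(#strictly-larger before, #larger-or-equal after) for each element
def specGo (pre rest : List Int) : Int :=
  match rest with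
  | [] => 0
  | x :: r =>
      min ((pre.countP (fun y => x < y) : Nat) : Int) ((r.countP (fun y => x ≤ y) : Nat) : Int)
        + specGo (pre ++ [x]) r

-- Python's lexicographic ≤ on int pairs
def lexLE (a b : Int × Int) : Prop := a.1 < b.1 ∨ (a.1 = b.1 ∧ a.2 ≤ b.2)

theorem lexLE_trans {a b c : Int × Int} (h1 : lexLE a b) (h2 : lexLE b c) : lexLE a c := by
  unfold lexLE at *; rcases h1 with h1 | ⟨h1, h1'⟩ <;> rcases h2 with h2 | ⟨h2, h2'⟩ <;> omega

-- the fold inside PySem.List.min2? (keys Prod.fst, Prod.snd) computes a lexicographic minimum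
theorem min2Go_spec (xs : List (Int × Int)) : ∀ (m0 : Int × Int),
    ∃ m : Int × Int, xs.foldl pvStep (some m0) = some m ∧
      (m = m0 ∨ m ∈ xs) ∧ lexLE m m0 ∧ ∀ y ∈ xs, lexLE m y := by
  induction xs with
  | nil =>
      intro m0
      exact ⟨m0, rfl, Or.inl rfl, by unfold lexLE; omega, by simp⟩
  | cons x t ih =>
      intro m0
      by_cases hc : (decide (Prod.fst x < Prod.fst m0) ||
          !decide (Prod.fst m0 < Prod.fst x) && decide (Prod.snd x < Prod.snd m0)) = true
      · obtain ⟨m, hfold, hmem, hle, hall⟩ := ih x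
        have hxm0 : lexLE x m0 := by
          simp only [Bool.or_eq_true, Bool.and_eq_true, Bool.not_eq_true', decide_eq_true_eq,
            decide_eq_false_iff_not] at hc
          unfold lexLE; omega
        refine ⟨m, ?_, ?_, lexLE_trans hle hxm0, ?_⟩
        · rw [List.foldl_cons, show pvStep (some m0) x = some x from by
            simp only [pvStep]; rw [if_pos hc]]
          exact hfold
        · rcases hmem with h | h
          · exact Or.inr (by simp [h])
          · exact Or.inr (List.mem_cons_of_mem _ h)
        · intro y hy
          rcases List.mem_cons.mp hy with h | h
          · exact h ▸ hle
          · exact hall y h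
      · obtain ⟨m, hfold, hmem, hle, hall⟩ := ih m0
        have hm0x : lexLE m0 x := by
          simp only [Bool.or_eq_true, Bool.and_eq_true, Bool.not_eq_true', decide_eq_true_eq,
            decide_eq_false_iff_not, not_or, not_and] at hc
          unfold lexLE; omega
        refine ⟨m, ?_, ?_, hle, ?_⟩
        · rw [List.foldl_cons, show pvStep (some m0) x = some m0 from by
            simp only [pvStep]; rw [if_neg hc]]
          exact hfold
        · rcases hmem with h | h
          · exact Or.inl h
          · exact Or.inr (List.mem_cons_of_mem _ h)
        · intro y hy
          rcases List.mem_cons.mp hy with h | h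
          · exact h ▸ lexLE_trans hle hm0x
          · exact hall y h

theorem min2?_spec (xs : List (Int × Int)) (hne : xs ≠ []) :
    ∃ m, PySem.List.min2? xs Prod.fst Prod.snd = some m ∧ m ∈ xs ∧ ∀ y ∈ xs, lexLE m y := by
  match xs with
  | [] => exact absurd rfl hne
  | p :: ps =>
      obtain ⟨m, hfold, hmem, hle, hall⟩ := min2Go_spec ps p
      refine ⟨m, ?_, ?_, ?_⟩
      · rw [min2?_eq_foldl, List.foldl_cons, show pvStep none p = some p from rfl]
        exact hfold
      · rcases hmem with h | h
        · simp [h]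
        · exact List.mem_cons_of_mem _ h
      · intro y hy
        rcases List.mem_cons.mp hy with h | h
        · exact h ▸ hle
        · exact hall y h

-- characterisation of A's argmin over the (value, index) pairs
theorem pv_min2_pairs_spec (seq : List Int) {e i : Int}
    (h : PySem.List.min2? ((PySem.List.pyRange 0 (seq.length : Int) 1).map
          (fun j => (PySem.List.pyGetD seq j 0, j))) Prod.fst Prod.snd = some (e, i)) :
    ∃ k : Nat, i = (k : Int) ∧ k < seq.length ∧ e = seq.getD k 0 ∧
      (∀ j : Nat, j < k → e < seq.getD j 0) ∧
      (∀ j : Nat, k < j → j < seq.length → e ≤ seq.getD j 0) := by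
  match hs : seq with
  | [] => simp [PySem.List.pyRange, PySem.List.min2?] at h
  | a :: t =>
    have hnn : (0 : Int) < ((a :: t).length : Int) := by exact_mod_cast (a :: t).length_pos_of_ne_nil (by simp)
    have hne : ((PySem.List.pyRange 0 ((a :: t).length : Int) 1).map
        (fun j => (PySem.List.pyGetD (a :: t) j 0, j))) ≠ [] := by
      rw [PySem.List.pyRange_one_cons hnn]
      simp
    obtain ⟨m, hm, hmem, hall⟩ := min2?_spec _ hne
    rw [h] at hm
    cases hm
    obtain ⟨j, hj, hfj⟩ := List.mem_map.mp hmem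
    rw [PySem.List.mem_pyRange_one] at hj
    obtain ⟨hj0, hjn⟩ := hj
    have he : PySem.List.pyGetD (a :: t) j 0 = e := congrArg Prod.fst hfj
    have hi : j = i := congrArg Prod.snd hfj
    have hbridge : ∀ j' : Nat, PySem.List.pyGetD (a :: t) ((j' : Nat) : Int) 0 = (a :: t).getD j' 0 := by
      intro j'
      exact PySem.List.pyGetD_natCast (a :: t) j' 0
    have hlex : ∀ j' : Nat, j' < (a :: t).length →
        e < (a :: t).getD j' 0 ∨ (e = (a :: t).getD j' 0 ∧ i ≤ (j' : Int)) := by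
      intro j' hj'
      have hmemj' : (PySem.List.pyGetD (a :: t) ((j' : Nat) : Int) 0, ((j' : Nat) : Int)) ∈
          ((PySem.List.pyRange 0 ((a :: t).length : Int) 1).map
            (fun j => (PySem.List.pyGetD (a :: t) j 0, j))) := by
        apply List.mem_map_of_mem
        rw [PySem.List.mem_pyRange_one]
        omega
      have hl := hall _ hmemj'
      unfold lexLE at hl
      simp only at hl
      rw [hbridge j'] at hl
      exact hl
    refine ⟨j.toNat, by omega, by omega, ?_, ?_, ?_⟩
    · rw [← he, ← hbridge j.toNat]
      congr 1
      omega
    · intro j' hj'lt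
      have hj'len : j' < (a :: t).length := by omega
      rcases hlex j' hj'len with hl | ⟨hl, hl'⟩
      · exact hl
      · exfalso; omega
    · intro j' hj'lo hj'hi
      rcases hlex j' hj'hi with hl | ⟨hl, _⟩
      · omega
      · omega

-- a minimal element sitting in the PREFIX accumulator never contributes to any later left-count
theorem specGo_pre_erase (e : Int) : ∀ (rest p q : List Int), (∀ y ∈ rest, e ≤ y) →
    specGo (p ++ e :: q) rest = specGo (p ++ q) rest := by
  intro rest
  induction rest with
  | nil => intro p q _; simp [specGo]
  | cons x r ih =>
      intro p q hall
      have hex : ¬ (x < e) := by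
        have := hall x (by simp)
        omega
      simp only [specGo]
      have hcount : (p ++ e :: q).countP (fun y => x < y) = (p ++ q).countP (fun y => x < y) := by
        simp [List.countP_append, hex]
      rw [hcount]
      have hstep : (p ++ e :: q) ++ [x] = p ++ e :: (q ++ [x]) := by simp
      rw [hstep, ih p (q ++ [x]) (fun y hy => hall y (by simp [hy]))]
      simp

-- removing the (value, index)-minimal element: its own cost separates, nobody else's changes
theorem specGo_skip (e : Int) : ∀ (L R pre : List Int),
    (∀ y ∈ L, e < y) → (∀ y ∈ R, e ≤ y) →
    specGo pre (L ++ e :: R) =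
      min ((pre.countP (fun y => e < y) + L.length : Nat) : Int) ((R.countP (fun y => e ≤ y) : Nat) : Int)
        + specGo pre (L ++ R) := by
  intro L
  induction L with
  | nil =>
      intro R pre _ hR
      simp only [List.nil_append, specGo]
      have : specGo (pre ++ [e]) R = specGo pre R := by
        have := specGo_pre_erase e R pre [] hR
        simpa using this
      rw [this]
      simp
  | cons a L' ih =>
      intro R pre hL hR
      have hae : e < a := hL a (by simp)
      simp only [List.cons_append, specGo]
      rw [ih R (pre ++ [a]) (fun y hy => hL y (by simp [hy])) hR]
      have hc1 : ((pre ++ [a]).countP (fun y => e < y)) = pre.countP (fun y => e < y) + 1 := by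
        simp [List.countP_append, hae]
      have hc2 : (L' ++ e :: R).countP (fun y => a ≤ y) = (L' ++ R).countP (fun y => a ≤ y) := by
        have : ¬ (a ≤ e) := by omega
        simp [List.countP_append, this]
      rw [hc1, hc2]
      simp only [List.length_cons]
      push_cast
      omega

theorem sum_ones_lt (l : List Int) (z : Int) :
    (l.map (fun y => if z < y then (1 : Int) else 0)).sum = ((l.countP (fun y => z < y) : Nat) : Int) := by
  simpa using PySem.List.sum_map_ite_one_zero (fun y => decide (z < y)) l

theorem sum_ones_le (l : List Int) (z : Int) :
    (l.map (fun y => if z ≤ y then (1 : Int) else 0)).sum = ((l.countP (fun y => z ≤ y) : Nat) : Int) := by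
  simpa using PySem.List.sum_map_ite_one_zero (fun y => decide (z ≤ y)) l

theorem solve_alt_go (rest : List Int) : ∀ (pre : List Int) (acc : Int),
    (PySem.List.enumerate rest (pre.length : Int)).foldl (fun total p =>
      let i := p.1
      let x := p.2
      let left := ((PySem.List.slice (pre ++ rest) none (some i)).map
        (fun y => if x < y then (1 : Int) else 0)).sum
      let right := ((PySem.List.slice (pre ++ rest) (some (i + 1)) none).map
        (fun y => if x ≤ y then (1 : Int) else 0)).sum
      total + min left right) acc = acc + specGo pre rest := by
  induction rest with
  | nil => intro pre acc; simp [PySem.List.enumerate, specGo]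
  | cons x r ih =>
      intro pre acc
      rw [PySem.List.enumerate_cons, List.foldl_cons]
      have harith : ((pre.length : Nat) : Int) + 1 = (((pre ++ [x]).length : Nat) : Int) := by
        simp
      rw [harith]
      have hlist : pre ++ x :: r = (pre ++ [x]) ++ r := by simp
      rw [hlist]
      rw [ih (pre ++ [x])]
      have hs1 : PySem.List.slice ((pre ++ [x]) ++ r) none (some ((pre.length : Nat) : Int)) = pre := by
        rw [PySem.List.slice_to _ (by positivity), Int.toNat_natCast, List.append_assoc]
        exact List.take_left
      have hs2 : PySem.List.slice ((pre ++ [x]) ++ r) (some ((((pre ++ [x]).length : Nat) : Int))) none = r := by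
        rw [PySem.List.slice_from _ (by positivity), Int.toNat_natCast]
        exact List.drop_left
      simp only [hs1, harith, hs2, sum_ones_lt, sum_ones_le]
      simp only [specGo]
      ring

theorem solve_alt_eq_specGo (seq : List Int) : solve_alt seq = specGo [] seq := by
  have := solve_alt_go seq [] 0
  simpa [solve_alt] using this

-- counting over lists where every element satisfies the predicate
theorem countP_all_le {e : Int} {R : List Int} (h : ∀ y ∈ R, e ≤ y) :
    R.countP (fun y => e ≤ y) = R.length :=
  List.countP_eq_length.mpr (fun y hy => by simpa using h y hy)

theorem solveLoop_eq_specGo : ∀ (n : Nat) (seq : List Int), seq.length = n →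
    ∀ (cost : Int), solveLoop seq cost = cost + specGo [] seq := by
  intro n
  induction n using Nat.strong_induction_on with
  | _ n ihn =>
    intro seq hlen cost
    rw [solveLoop]
    by_cases hne : seq = []
    · subst hne
      simp [specGo]
    · have hbool : seq.isEmpty = false := by simp [hne]
      rw [if_neg (by simp [hbool])]
      have hnn : 0 < seq.length := List.length_pos_iff.mpr hne
      show (match hm : PySem.List.min2? ((PySem.List.pyRange 0 (seq.length : Int) 1).map
          (fun j => (PySem.List.pyGetD seq j 0, j))) Prod.fst Prod.snd with
        | none => cost
        | some (e, i) =>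
          solveLoop (seq.eraseIdx i.toNat) (cost + min i ((seq.length : Int) - 1 - i))) =
        cost + specGo [] seq
      split
      · next heq =>
          exfalso
          have hpne : ((PySem.List.pyRange 0 (seq.length : Int) 1).map
              (fun j => (PySem.List.pyGetD seq j 0, j))) ≠ [] := by
            rw [PySem.List.pyRange_one_cons (by exact_mod_cast hnn)]
            simp
          obtain ⟨m, hm, _, _⟩ := min2?_spec _ hpne
          rw [heq] at hm
          cases hm
      · next e i heq =>
        obtain ⟨k, hik, hk, he, hbefore, hafter⟩ := pv_min2_pairs_spec seq heq
        have hktoNat : i.toNat = k := by omega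
        -- decompose seq around position k
        have hsplit : seq = seq.take k ++ seq.getD k 0 :: seq.drop (k + 1) := by
          conv_lhs => rw [← List.take_append_drop k seq]
          congr 1
          rw [List.drop_eq_getElem_cons hk, List.getD_eq_getElem _ _ hk]
        have hLall : ∀ y ∈ seq.take k, e < y := by
          intro y hy
          obtain ⟨j, hj, hgy⟩ := List.getElem_of_mem hy
          have hjk : j < k := by
            have := hj
            simp [List.length_take] at this
            omega
          have hjlen : j < seq.length := by omega
          have hb := hbefore j hjk
          rw [List.getD_eq_getElem _ _ hjlen] at hb
          rw [← hgy, List.getElem_take]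
          exact hb
        have hRall : ∀ y ∈ seq.drop (k + 1), e ≤ y := by
          intro y hy
          obtain ⟨j, hj, hgy⟩ := List.getElem_of_mem hy
          have hjlen : k + 1 + j < seq.length := by
            have := List.length_drop (i := k + 1) (l := seq)
            omega
          have ha := hafter (k + 1 + j) (by omega) hjlen
          rw [List.getD_eq_getElem _ _ hjlen] at ha
          rw [← hgy, List.getElem_drop]
          exact ha
        have herase : seq.eraseIdx i.toNat = seq.take k ++ seq.drop (k + 1) := by
          rw [hktoNat]
          exact List.eraseIdx_eq_take_drop_succ seq k
        have hIH := ihn (n - 1) (by omega) (seq.eraseIdx i.toNat)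
          (by rw [herase]; simp [List.length_take, List.length_drop]; omega)
          (cost + min i ((seq.length : Int) - 1 - i))
        rw [hIH]
        have hskip := specGo_skip e (seq.take k) (seq.drop (k + 1)) [] hLall hRall
        rw [he] at hskip
        conv_rhs => rw [hsplit]
        rw [hskip, ← he, ← herase]
        have hcR := countP_all_le hRall
        have hlt : (seq.take k).length = k := by
          simp [List.length_take]
          omega
        have hld : (seq.drop (k + 1)).length = seq.length - (k + 1) := List.length_drop
        rw [hcR, hlt, hld]
        have hmin : min i ((seq.length : Int) - 1 - i)
            = min ((([] : List Int).countP (fun y => e < y) + k : Nat) : Int)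
                ((seq.length - (k + 1) : Nat) : Int) := by
          simp only [List.countP_nil]
          push_cast [hik]
          omega
        rw [hmin]
        ring

-- ===== VERDICT (by name: the statement is the Claim_ definition above) =====
theorem solve_spec : Claim_equal_solve := by
  intro seq _
  unfold Spec_solve
  rw [solve, solveLoop_eq_specGo seq.length seq rfl, solve_alt_eq_specGo, zero_add]
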